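-- pv_equiv track=rewrite | github.com/matiasrebollo/dp-defense-strategy | utils.py | obtener_optimo_bt
-- ===== SOURCE A (Python) =====
-- def obtener_optimo_bt(enemigos, potencias, optimo_pd, i, optimo_actual, ultimo_ataque):
--     if i == len(enemigos):
--         return optimo_actual
--
--     if optimo_actual + sum(enemigos[i:]) <= optimo_pd:
--         return optimo_pd
--
--     nuevo_optimo = optimo_actual + min(enemigos[i], potencias[i-ultimo_ataque])
--     optimo_atacando = obtener_optimo_bt(enemigos, potencias, optimo_pd, i+1, nuevo_optimo, i+1)
--     optimo_sin_atacar = obtener_optimo_bt(enemigos, potencias, optimo_pd, i+1, optimo_actual, ultimo_ataque)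
--
--     return max(optimo_atacando, optimo_sin_atacar)
-- ===== SOURCE B (Python) =====
-- def obtener_optimo_bt(enemigos, potencias, optimo_pd, i, optimo_actual, ultimo_ataque):
--     n = len(enemigos)
--     if i == n:
--         return optimo_actual
--     if optimo_actual + sum(enemigos[i:]) <= optimo_pd:
--         return optimo_pd
--     # prefix sums computed once replace the per-node sum(enemigos[j:]) of the recursion
--     pref = [0]
--     for x in enemigos:
--         pref.append(pref[-1] + x)
--     total = pref[n]
--     # explicit-stack DFS keeping one running maximum instead of recursive max-combination
--     best = None
--     stack = [(i + 1, optimo_actual + min(enemigos[i], potencias[i - ultimo_ataque]), i + 1),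
--              (i + 1, optimo_actual, ultimo_ataque)]
--     while stack:
--         j, oa, ua = stack.pop()
--         if j == n:
--             v = oa
--         elif oa + (total - pref[j]) <= optimo_pd:
--             v = optimo_pd
--         else:
--             stack.append((j + 1, oa + min(enemigos[j], potencias[j - ua]), j + 1))
--             stack.append((j + 1, oa, ua))
--             continue
--         best = v if best is None else max(best, v)
--     return best
-- ===== Notes on version B (the rewrite author's own statement) =====
-- stated objective: alternative
-- what changed: The recursive backtracking (per-node sum(enemigos[i:]) recomputation, recursive max of two subtree calls) is replaced by an explicit-stack DFS that keeps a single running maximum over terminal nodes and uses prefix sums computed once for the pruning bound; Pre_ excludes out-of-range i/ultimo_ataque and too-short potencias, where A usually raises IndexError or RecursionError though Python's negative-index wraparound sometimes lets it return an accidental value.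
-- outside the precondition, e.g. on obtener_optimo_bt([9, 10, 15, 15], [4, -12, -4, -5, 15], -15, -2, -21, 0): A returns 10, B returns -15
import Mathlib
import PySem

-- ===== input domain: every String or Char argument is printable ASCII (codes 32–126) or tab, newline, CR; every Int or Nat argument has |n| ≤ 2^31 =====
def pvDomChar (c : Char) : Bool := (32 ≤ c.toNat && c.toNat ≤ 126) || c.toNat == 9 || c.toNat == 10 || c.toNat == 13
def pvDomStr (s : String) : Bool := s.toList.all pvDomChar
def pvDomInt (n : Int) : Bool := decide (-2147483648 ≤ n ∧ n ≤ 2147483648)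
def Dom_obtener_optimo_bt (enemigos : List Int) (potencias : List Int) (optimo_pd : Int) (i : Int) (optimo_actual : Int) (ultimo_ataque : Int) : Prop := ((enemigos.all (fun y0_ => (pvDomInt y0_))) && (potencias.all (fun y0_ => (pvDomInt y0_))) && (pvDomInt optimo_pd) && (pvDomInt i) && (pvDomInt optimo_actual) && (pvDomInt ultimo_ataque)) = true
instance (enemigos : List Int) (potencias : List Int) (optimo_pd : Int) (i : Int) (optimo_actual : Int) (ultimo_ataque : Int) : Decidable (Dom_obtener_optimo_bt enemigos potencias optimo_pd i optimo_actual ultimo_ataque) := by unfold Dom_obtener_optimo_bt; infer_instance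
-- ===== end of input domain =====

-- B replaces A's recursive backtracking by an explicit-stack DFS with a running maximum and
-- once-computed prefix sums for the pruning bound (objective: alternative decomposition).

-- ===== PORT A =====
-- fuel = number of remaining recursion levels; inside Pre_ it never runs out.
-- pyGetD _ _ 0 : an out-of-range access raises IndexError in Python; Pre_ excludes those inputs.
def btA (e p : List Int) (pd : Int) (fuel : Nat) (i oa ua : Int) : Int :=
  if i = (e.length : Int) then oa
  else if oa + (PySem.List.slice e (some i) none).sum ≤ pd then pd
  else
    match fuel with
    | 0 => 0   -- unreachable inside Pre_
    | f + 1 =>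
      let nuevo := oa + min (PySem.List.pyGetD e i 0) (PySem.List.pyGetD p (i - ua) 0)
      max (btA e p pd f (i + 1) nuevo (i + 1)) (btA e p pd f (i + 1) oa ua)

def obtener_optimo_bt (enemigos : List Int) (potencias : List Int) (optimo_pd : Int) (i : Int) (optimo_actual : Int) (ultimo_ataque : Int) : Int :=
  btA enemigos potencias optimo_pd (((enemigos.length : Int) - i).toNat) i optimo_actual ultimo_ataque

-- ===== PORT B =====
-- pref.append(pref[-1] + x) of Source B
def stepPref (pr : List Int) (x : Int) : List Int :=
  pr ++ [PySem.List.pyGetD pr (-1) 0 + x]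

-- the while-loop of Source B; the Lean list holds the stack top at the head; fuel never runs out inside Pre_.
def runB (e p : List Int) (pd total : Int) (pref : List Int) (fuel : Nat)
    (stack : List (Int × Int × Int)) (best : Option Int) : Option Int :=
  match fuel, stack with
  | 0, _ => best          -- unreachable inside Pre_
  | _ + 1, [] => best
  | fuel + 1, (j, oa, ua) :: rest =>
    if j = (e.length : Int) then
      runB e p pd total pref fuel rest (some (match best with | none => oa | some b => max b oa))
    else if oa + (total - PySem.List.pyGetD pref j 0) ≤ pd then
      runB e p pd total pref fuel rest (some (match best with | none => pd | some b => max b pd))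
    else
      runB e p pd total pref fuel
        ((j + 1, oa, ua) ::
         (j + 1, oa + min (PySem.List.pyGetD e j 0) (PySem.List.pyGetD p (j - ua) 0), j + 1) :: rest)
        best

def obtener_optimo_bt_alt (enemigos : List Int) (potencias : List Int) (optimo_pd : Int) (i : Int) (optimo_actual : Int) (ultimo_ataque : Int) : Int :=
  if i = (enemigos.length : Int) then optimo_actual
  else if optimo_actual + (PySem.List.slice enemigos (some i) none).sum ≤ optimo_pd then optimo_pd
  else
    let pref := enemigos.foldl stepPref [0]
    let total := PySem.List.pyGetD pref (enemigos.length : Int) 0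
    let nuevo := optimo_actual + min (PySem.List.pyGetD enemigos i 0)
                                     (PySem.List.pyGetD potencias (i - ultimo_ataque) 0)
    (runB enemigos potencias optimo_pd total pref (2 * 3 ^ enemigos.length)
        ((i + 1, optimo_actual, ultimo_ataque) :: (i + 1, nuevo, i + 1) :: []) none).getD 0

-- ===== PRECONDITION & SPEC =====
-- Pre_ admits the two immediate-return cases (i == len(enemigos), or the entry pruning bound already
-- holds) and the well-formed recursion region (0 ≤ ultimo_ataque ≤ i ≤ len(enemigos) ≤ len(potencias)).
-- It excludes out-of-range i / ultimo_ataque and too-short potencias, on which the backtracking indexes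
-- out of bounds: there A usually raises IndexError or RecursionError, though Python's negative-index
-- wraparound sometimes lets A return an accidental value (see the cite in claim.json).
def Pre_obtener_optimo_bt (enemigos : List Int) (potencias : List Int) (optimo_pd : Int) (i : Int) (optimo_actual : Int) (ultimo_ataque : Int) : Prop :=
  i = (enemigos.length : Int)
  ∨ optimo_actual + (PySem.List.slice enemigos (some i) none).sum ≤ optimo_pd
  ∨ (0 ≤ i ∧ i ≤ (enemigos.length : Int) ∧ 0 ≤ ultimo_ataque ∧ ultimo_ataque ≤ i
      ∧ enemigos.length ≤ potencias.length)
instance (enemigos : List Int) (potencias : List Int) (optimo_pd : Int) (i : Int) (optimo_actual : Int) (ultimo_ataque : Int) : Decidable (Pre_obtener_optimo_bt enemigos potencias optimo_pd i optimo_actual ultimo_ataque) := by unfold Pre_obtener_optimo_bt; infer_instance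

def pvWitness_obtener_optimo_bt : List Int × List Int × Int × Int × Int × Int :=
  ([3, 5, 2], [9, 1, 4], 4, 0, 0, 0)

def Spec_obtener_optimo_bt (enemigos : List Int) (potencias : List Int) (optimo_pd : Int) (i : Int) (optimo_actual : Int) (ultimo_ataque : Int) (out : Int) : Prop := out = obtener_optimo_bt_alt enemigos potencias optimo_pd i optimo_actual ultimo_ataque
instance (enemigos : List Int) (potencias : List Int) (optimo_pd : Int) (i : Int) (optimo_actual : Int) (ultimo_ataque : Int) (out : Int) : Decidable (Spec_obtener_optimo_bt enemigos potencias optimo_pd i optimo_actual ultimo_ataque out) := by unfold Spec_obtener_optimo_bt; infer_instance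

-- ===== CLAIM (what is proved, stated in full; the proofs are below) =====
def Claim_equal_obtener_optimo_bt : Prop := ∀ (enemigos : List Int) (potencias : List Int) (optimo_pd : Int) (i : Int) (optimo_actual : Int) (ultimo_ataque : Int), Dom_obtener_optimo_bt enemigos potencias optimo_pd i optimo_actual ultimo_ataque → Pre_obtener_optimo_bt enemigos potencias optimo_pd i optimo_actual ultimo_ataque → Spec_obtener_optimo_bt enemigos potencias optimo_pd i optimo_actual ultimo_ataque (obtener_optimo_bt enemigos potencias optimo_pd i optimo_actual ultimo_ataque)

-- ===== LEMMAS AND PROOFS =====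

-- partial sums of l starting after s
def psums : Int → List Int → List Int
  | _, [] => []
  | s, x :: xs => (s + x) :: psums (s + x) xs

theorem length_psums (s : Int) (l : List Int) : (psums s l).length = l.length := by
  induction l generalizing s with
  | nil => rfl
  | cons x xs ih => simp [psums, ih]

theorem psums_getElem (l : List Int) (s : Int) (k : Nat) (h : k < l.length) :
    (psums s l)[k]'(by rw [length_psums]; exact h) = s + (l.take (k + 1)).sum := by
  induction l generalizing s k with
  | nil => simp at h
  | cons x xs ih =>
    cases k with
    | zero => simp [psums]
    | succ k =>
      have := ih (s + x) k (by simpa using h)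
      simp [psums, this, add_assoc]

theorem foldl_stepPref (l : List Int) : ∀ (acc : List Int) (s : Int) (h : acc ≠ []), acc.getLast h = s →
    l.foldl stepPref acc = acc ++ psums s l := by
  induction l with
  | nil => intro acc s h hs; simp [psums]
  | cons x xs ih =>
    intro acc s h hs
    have hget : PySem.List.pyGetD acc (-1) 0 = s := by
      rw [PySem.List.pyGetD_neg_one (h := h)]; exact hs
    have step : stepPref acc x = acc ++ [s + x] := by simp [stepPref, hget]
    have hne : acc ++ [s + x] ≠ [] := by simp
    have hlast : (acc ++ [s + x]).getLast hne = s + x := by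
      simp
    calc (x :: xs).foldl stepPref acc = xs.foldl stepPref (acc ++ [s + x]) := by
          simp [List.foldl_cons, step]
      _ = (acc ++ [s + x]) ++ psums (s + x) xs := ih _ _ hne hlast
      _ = acc ++ psums s (x :: xs) := by simp [psums]

theorem pref_eq (e : List Int) : e.foldl stepPref [0] = [0] ++ psums 0 e :=
  foldl_stepPref e [0] 0 (by simp) rfl

-- pref[j] = sum of the first j enemies, for 0 ≤ j ≤ n
theorem pref_getD (e : List Int) (j : Int) (h0 : 0 ≤ j) (hn : j ≤ (e.length : Int)) :
    PySem.List.pyGetD (e.foldl stepPref [0]) j 0 = (e.take j.toNat).sum := by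
  rw [pref_eq]
  have hlen : j < (([(0 : Int)] ++ psums 0 e).length : Int) := by
    simp [length_psums]; omega
  rw [PySem.List.pyGetD_eq_getElem _ _ h0 hlen]
  rcases Nat.eq_zero_or_pos j.toNat with hz | hp
  · simp [hz]
  · obtain ⟨k, hk⟩ : ∃ k, j.toNat = k + 1 := ⟨j.toNat - 1, by omega⟩
    have hkl : k < e.length := by omega
    have h1 : ([(0 : Int)] ++ psums 0 e)[j.toNat]'(by simp [length_psums]; omega)
        = (psums 0 e)[k]'(by rw [length_psums]; exact hkl) := by
      simp [hk]
    rw [h1, psums_getElem e 0 k hkl, hk]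
    simp

-- the A-value of a stack frame
def valA (e p : List Int) (pd : Int) (f : Int × Int × Int) : Int :=
  btA e p pd (((e.length : Int) - f.1).toNat) f.1 f.2.1 f.2.2

-- weight of a frame: bounds the number of loop iterations its subtree costs
def wgt (n : Nat) (f : Int × Int × Int) : Nat := 3 ^ (((n : Int) - f.1).toNat)

def stepM (e p : List Int) (pd : Int) (b : Option Int) (f : Int × Int × Int) : Option Int :=
  some (match b with | none => valA e p pd f | some x => max x (valA e p pd f))

theorem wgt_pos (n : Nat) (f : Int × Int × Int) : 1 ≤ wgt n f :=
  Nat.one_le_pow _ _ (by norm_num)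

theorem sum_take_drop (e : List Int) (k : Nat) :
    (e.take k).sum + (e.drop k).sum = e.sum := by
  rw [← List.sum_append, List.take_append_drop]

-- unfolding lemmas for the two ports
theorem btA_len (e p : List Int) (pd : Int) (fuel : Nat) (i oa ua : Int)
    (h : i = (e.length : Int)) : btA e p pd fuel i oa ua = oa := by
  rw [btA.eq_def]; simp [h]

theorem btA_prune (e p : List Int) (pd : Int) (fuel : Nat) (i oa ua : Int)
    (h1 : i ≠ (e.length : Int)) (h2 : oa + (PySem.List.slice e (some i) none).sum ≤ pd) :
    btA e p pd fuel i oa ua = pd := by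
  rw [btA.eq_def]; simp [h1, h2]

theorem btA_succ (e p : List Int) (pd : Int) (f : Nat) (i oa ua : Int)
    (h1 : i ≠ (e.length : Int)) (h2 : ¬ oa + (PySem.List.slice e (some i) none).sum ≤ pd) :
    btA e p pd (f + 1) i oa ua =
      max (btA e p pd f (i + 1)
            (oa + min (PySem.List.pyGetD e i 0) (PySem.List.pyGetD p (i - ua) 0)) (i + 1))
          (btA e p pd f (i + 1) oa ua) := by
  rw [btA.eq_def]; simp [h1, h2]

theorem runB_nil (e p : List Int) (pd total : Int) (pref : List Int) (fuel : Nat)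
    (best : Option Int) : runB e p pd total pref fuel [] best = best := by
  cases fuel <;> rw [runB.eq_def]

theorem runB_term (e p : List Int) (pd total : Int) (pref : List Int) (fuel : Nat)
    (j oa ua : Int) (rest : List (Int × Int × Int)) (best : Option Int)
    (h : j = (e.length : Int)) :
    runB e p pd total pref (fuel + 1) ((j, oa, ua) :: rest) best =
      runB e p pd total pref fuel rest
        (some (match best with | none => oa | some b => max b oa)) := by
  rw [runB.eq_def]; simp [h]

theorem runB_prune (e p : List Int) (pd total : Int) (pref : List Int) (fuel : Nat)
    (j oa ua : Int) (rest : List (Int × Int × Int)) (best : Option Int)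
    (h1 : j ≠ (e.length : Int)) (h2 : oa + (total - PySem.List.pyGetD pref j 0) ≤ pd) :
    runB e p pd total pref (fuel + 1) ((j, oa, ua) :: rest) best =
      runB e p pd total pref fuel rest
        (some (match best with | none => pd | some b => max b pd)) := by
  rw [runB.eq_def]; simp [h1, h2]

theorem runB_expand (e p : List Int) (pd total : Int) (pref : List Int) (fuel : Nat)
    (j oa ua : Int) (rest : List (Int × Int × Int)) (best : Option Int)
    (h1 : j ≠ (e.length : Int)) (h2 : ¬ oa + (total - PySem.List.pyGetD pref j 0) ≤ pd) :
    runB e p pd total pref (fuel + 1) ((j, oa, ua) :: rest) best =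
      runB e p pd total pref fuel
        ((j + 1, oa, ua) ::
         (j + 1, oa + min (PySem.List.pyGetD e j 0) (PySem.List.pyGetD p (j - ua) 0), j + 1) :: rest)
        best := by
  rw [runB.eq_def]; simp [h1, h2]

theorem runB_spec (e p : List Int) (pd total : Int) (pref : List Int)
    (hpref : pref = e.foldl stepPref [0]) (htot : total = e.sum) :
    ∀ (fuel : Nat) (frames : List (Int × Int × Int)) (best : Option Int),
    (∀ f ∈ frames, 0 ≤ f.1 ∧ f.1 ≤ (e.length : Int)) →
    (frames.map (wgt e.length)).sum ≤ fuel →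
    runB e p pd total pref fuel frames best = frames.foldl (stepM e p pd) best := by
  intro fuel
  induction fuel with
  | zero =>
    intro frames best _ hw
    cases frames with
    | nil => rw [runB_nil]; rfl
    | cons f rest =>
      exfalso
      have h1 := wgt_pos e.length f
      simp only [List.map_cons, List.sum_cons] at hw
      omega
  | succ fuel ih =>
    intro frames best hv hw
    cases frames with
    | nil => rw [runB_nil]; rfl
    | cons f rest =>
      obtain ⟨j, oa, ua⟩ := f
      have hj0 : 0 ≤ j := (hv _ (List.mem_cons_self)).1
      have hjn : j ≤ (e.length : Int) := (hv _ (List.mem_cons_self)).2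
      have hvrest : ∀ f ∈ rest, 0 ≤ f.1 ∧ f.1 ≤ (e.length : Int) :=
        fun f hf => hv f (List.mem_cons_of_mem _ hf)
      have hw1 := wgt_pos e.length (j, oa, ua)
      simp only [List.map_cons, List.sum_cons] at hw
      -- the pruning conditions of the two ports agree
      have hbridge : total - PySem.List.pyGetD pref j 0 = (PySem.List.slice e (some j) none).sum := by
        rw [hpref, pref_getD e j hj0 hjn, htot, PySem.List.slice_from _ hj0]
        have := sum_take_drop e j.toNat
        omega
      by_cases hterm : j = (e.length : Int)
      · -- terminal frame
        have hval : valA e p pd (j, oa, ua) = oa := btA_len _ _ _ _ _ _ _ hterm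
        rw [runB_term _ _ _ _ _ _ _ _ _ _ _ hterm, ih rest _ hvrest (by omega)]
        simp only [List.foldl_cons, stepM, hval]
      · by_cases hprune : oa + (total - PySem.List.pyGetD pref j 0) ≤ pd
        · -- pruned frame
          have hval : valA e p pd (j, oa, ua) = pd :=
            btA_prune _ _ _ _ _ _ _ hterm (by rw [← hbridge]; exact hprune)
          rw [runB_prune _ _ _ _ _ _ _ _ _ _ _ hterm hprune, ih rest _ hvrest (by omega)]
          simp only [List.foldl_cons, stepM, hval]
        · -- expanded frame
          have hjlt : j < (e.length : Int) := lt_of_le_of_ne hjn hterm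
          obtain ⟨k, hk1, hk2⟩ : ∃ k, ((e.length : Int) - j).toNat = k + 1 ∧
              ((e.length : Int) - (j + 1)).toNat = k :=
            ⟨((e.length : Int) - (j + 1)).toNat, by omega, rfl⟩
          set catt : Int × Int × Int :=
            (j + 1, oa + min (PySem.List.pyGetD e j 0) (PySem.List.pyGetD p (j - ua) 0), j + 1)
            with hcatt
          set cno : Int × Int × Int := (j + 1, oa, ua) with hcno
          have hval : valA e p pd (j, oa, ua) = max (valA e p pd catt) (valA e p pd cno) := by
            show btA e p pd (((e.length : Int) - j).toNat) j oa ua = _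
            rw [hk1, btA_succ _ _ _ _ _ _ _ hterm (by rw [← hbridge]; exact hprune)]
            simp only [valA, hcatt, hcno, hk2]
          have hvchild : ∀ f ∈ cno :: catt :: rest, 0 ≤ f.1 ∧ f.1 ≤ (e.length : Int) := by
            intro f hf
            rcases hf with _ | ⟨_, hf⟩
            · refine ⟨?_, ?_⟩ <;> simp [hcno] <;> omega
            · rcases hf with _ | ⟨_, hf⟩
              · refine ⟨?_, ?_⟩ <;> simp [hcatt] <;> omega
              · exact hvrest f hf
          have hwchild : ((cno :: catt :: rest).map (wgt e.length)).sum ≤ fuel := by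
            have h3 : (1 : Nat) ≤ 3 ^ k := Nat.one_le_pow _ _ (by norm_num)
            simp only [List.map_cons, List.sum_cons, wgt, hcno, hcatt] at hw ⊢
            simp only [hk1, hk2] at hw ⊢
            have hpow : 3 ^ (k + 1) = 3 ^ k + 3 ^ k + 3 ^ k := by ring
            omega
          rw [runB_expand _ _ _ _ _ _ _ _ _ _ _ hterm hprune, ih _ _ hvchild hwchild]
          simp only [List.foldl_cons]
          congr 1
          cases best with
          | none => simp [stepM, hval, max_comm]
          | some b => simp [stepM, hval, max_comm, max_assoc]

theorem obtener_optimo_bt_spec : Claim_equal_obtener_optimo_bt := by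
  intro e p pd i oa ua _ hpre
  unfold Spec_obtener_optimo_bt obtener_optimo_bt obtener_optimo_bt_alt
  by_cases hterm : i = (e.length : Int)
  · rw [btA_len _ _ _ _ _ _ _ hterm]; simp [hterm]
  · by_cases hprune : oa + (PySem.List.slice e (some i) none).sum ≤ pd
    · rw [btA_prune _ _ _ _ _ _ _ hterm hprune]; simp [hterm, hprune]
    · -- main region: the third disjunct of Pre_ must hold
      have hmain : 0 ≤ i ∧ i ≤ (e.length : Int) ∧ 0 ≤ ua ∧ ua ≤ i ∧ e.length ≤ p.length := by
        rcases hpre with h | h | h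
        · exact absurd h hterm
        · exact absurd h hprune
        · exact h
      obtain ⟨hi0, hin, _, _, _⟩ := hmain
      have hilt : i < (e.length : Int) := lt_of_le_of_ne hin hterm
      obtain ⟨k, hk1, hk2⟩ : ∃ k, ((e.length : Int) - i).toNat = k + 1 ∧
          ((e.length : Int) - (i + 1)).toNat = k :=
        ⟨((e.length : Int) - (i + 1)).toNat, by omega, rfl⟩
      have htot : PySem.List.pyGetD (e.foldl stepPref [0]) (e.length : Int) 0 = e.sum := by
        rw [pref_getD e _ (by omega) (by omega)]
        simp
      have hrun := runB_spec e p pd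
          (PySem.List.pyGetD (e.foldl stepPref [0]) ((e.length : Int)) 0)
          (e.foldl stepPref [0]) rfl htot (2 * 3 ^ e.length)
          [(i + 1, oa, ua),
           (i + 1, oa + min (PySem.List.pyGetD e i 0) (PySem.List.pyGetD p (i - ua) 0), i + 1)]
          none
          (by intro f hf
              rcases hf with _ | ⟨_, hf⟩
              · refine ⟨?_, ?_⟩ <;> simp <;> omega
              · rcases hf with _ | ⟨_, hf⟩
                · refine ⟨?_, ?_⟩ <;> simp <;> omega
                · cases hf)
          (by have hle : 3 ^ (((e.length : Int) - (i + 1)).toNat) ≤ 3 ^ e.length :=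
                Nat.pow_le_pow_right (by norm_num) (by omega)
              simp only [List.map_cons, List.map_nil, List.sum_cons, List.sum_nil, wgt]
              omega)
      rw [if_neg hterm, if_neg hprune]
      change btA e p pd (((e.length : Int) - i).toNat) i oa ua =
        (runB e p pd (PySem.List.pyGetD (e.foldl stepPref [0]) ((e.length : Int)) 0)
            (e.foldl stepPref [0]) (2 * 3 ^ e.length)
            ((i + 1, oa, ua) ::
             (i + 1, oa + min (PySem.List.pyGetD e i 0) (PySem.List.pyGetD p (i - ua) 0), i + 1) :: [])
            none).getD 0
      rw [hk1, btA_succ _ _ _ _ _ _ _ hterm hprune, hrun]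
      simp only [List.foldl_cons, List.foldl_nil, stepM, Option.getD_some, valA, hk2]
      exact max_comm _ _
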